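-- pv_equiv track=rewrite | github.com/DennisGross/optimized_model_learning_for_prism | main.py | create_head_expression
-- ===== SOURCE A (Python) =====
-- def create_head_expression(tuples_list_):
--     expressions = []
--
--     for tuples_list in tuples_list_:
--         t= tuples_list.split(',')
--         t=[e.replace('(','') for e in t]
--         t=[e.replace(')','') for e in t]
--
--         if len(set(t)) >= 1:  # All elements are the same
--             expressions.append(' & '.join(t))
--
--
--     return ' | '.join( expr for expr in expressions)
-- ===== SOURCE B (Python) =====
-- def create_head_expression(tuples_list_):
--     out = []
--     first = True
--     for s in tuples_list_:
--         if not first: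
--             out.append(' | ')
--         first = False
--         for ch in s:
--             if ch == '(' or ch == ')':
--                 continue
--             if ch == ',':
--                 out.append(' & ')
--             else:
--                 out.append(ch)
--     return ''.join(out)
-- ===== Notes on version B (the rewrite author's own statement) =====
-- stated objective: alternative
-- what changed: Replaces A's staged split-on-comma / per-token paren-stripping / set-guarded list-of-expressions / double join pipeline with a single character-level pass: one loop over all characters with an accumulator list and a first-flag, skipping parens, emitting ' & ' for each comma and ' | ' between strings.
import Mathlib
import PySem

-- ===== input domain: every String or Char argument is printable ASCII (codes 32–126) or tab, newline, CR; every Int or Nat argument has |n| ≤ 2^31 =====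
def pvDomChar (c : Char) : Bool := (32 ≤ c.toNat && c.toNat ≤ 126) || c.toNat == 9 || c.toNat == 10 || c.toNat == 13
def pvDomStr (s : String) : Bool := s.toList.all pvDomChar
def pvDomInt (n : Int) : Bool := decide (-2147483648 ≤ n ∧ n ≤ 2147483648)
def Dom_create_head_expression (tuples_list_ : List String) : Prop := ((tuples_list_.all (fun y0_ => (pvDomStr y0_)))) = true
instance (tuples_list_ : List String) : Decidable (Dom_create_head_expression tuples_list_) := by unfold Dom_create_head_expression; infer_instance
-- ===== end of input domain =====

-- B replaces A's split/strip/join pipeline by a single character-level pass with an accumulator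
-- and a first-flag (alternative decomposition, same cost); return values are proved equal.

-- ===== PORT A =====
def create_head_expression (tuples_list_ : List String) : String :=
  let expressions := tuples_list_.foldl (fun expressions tuples_list =>
    -- t = tuples_list.split(',') ; sep "," is a nonempty literal, so split? is always `some`
    let t := (PySem.Str.split? tuples_list ",").getD []
    let t := t.map (fun e => PySem.Str.replace e "(" "")
    let t := t.map (fun e => PySem.Str.replace e ")" "")
    if PySem.Set.len (PySem.Set.ofList t) ≥ 1 then
      expressions ++ [PySem.Str.join " & " t]
    else
      expressions) []
  PySem.Str.join " | " expressions

-- ===== PORT B =====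
-- one pass over every character: out is the accumulator list of characters
-- (Python appends string fragments to a list and ''.joins them = concatenation)
def create_head_expression_alt (tuples_list_ : List String) : String :=
  let res := tuples_list_.foldl (fun (st : List Char × Bool) s =>
    let out := if st.2 = false then st.1 ++ " | ".toList else st.1
    let out := s.toList.foldl (fun out ch =>
      if ch = '(' ∨ ch = ')' then out            -- continue
      else if ch = ',' then out ++ " & ".toList
      else out ++ [ch]) out
    (out, false)) ([], true)
  String.ofList res.1

-- ===== PRECONDITION & SPEC =====
def Spec_create_head_expression (tuples_list_ : List String) (out : String) : Prop := out = create_head_expression_alt tuples_list_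
instance (tuples_list_ : List String) (out : String) : Decidable (Spec_create_head_expression tuples_list_ out) := by unfold Spec_create_head_expression; infer_instance

-- ===== CLAIM (what is proved, stated in full; the proofs are below) =====
def Claim_equal_create_head_expression : Prop := ∀ (tuples_list_ : List String), Dom_create_head_expression tuples_list_ → Spec_create_head_expression tuples_list_ (create_head_expression tuples_list_)

-- ===== LEMMAS AND PROOFS =====

-- replOne a r l = l with every occurrence of the single character a replaced by r
def replOne (a : Char) (r : List Char) (l : List Char) : List Char :=
  l.flatMap (fun c => if c == a then r else [c])

-- splitOne a l = l split on the single character a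
def splitOne (a : Char) : List Char → List (List Char)
  | [] => [[]]
  | c :: t => if c == a then [] :: splitOne a t else (splitOne a t).modifyHead (c :: ·)

theorem replOne_cons (a : Char) (r : List Char) (c : Char) (t : List Char) :
    replOne a r (c :: t) = (if c == a then r else [c]) ++ replOne a r t := by
  simp [replOne]

theorem replOne_append (a : Char) (r x y : List Char) :
    replOne a r (x ++ y) = replOne a r x ++ replOne a r y := by
  simp [replOne]

theorem replace_go_single (a : Char) (r : List Char) :
    ∀ (fuel : Nat) (l acc : List Char), l.length ≤ fuel →
      PySem.Chars.replace.go [a] r fuel l acc = acc.reverse ++ replOne a r l := by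
  intro fuel
  induction fuel with
  | zero =>
    intro l acc h
    have : l = [] := List.eq_nil_of_length_eq_zero (Nat.le_zero.mp h)
    subst this
    simp [PySem.Chars.replace.go, replOne]
  | succ n ih =>
    intro l acc h
    cases l with
    | nil => simp [PySem.Chars.replace.go, replOne]
    | cons c t =>
      have ht : t.length ≤ n := by simpa using h
      simp only [PySem.Chars.replace.go, List.isPrefixOf, Bool.and_true]
      by_cases hac : a = c
      · subst hac
        simp only [beq_self_eq_true, if_true, List.length_cons, List.length_nil,
          Nat.zero_add, List.drop_succ_cons, List.drop_zero]
        rw [ih t _ ht]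
        simp [replOne_cons]
      · rw [if_neg (by simp [hac])]
        rw [ih t _ ht]
        simp [replOne_cons, Ne.symm hac]

theorem replace_single (a : Char) (r l : List Char) :
    PySem.Chars.replace l [a] r = replOne a r l := by
  rw [PySem.Chars.replace, if_neg (by simp)]
  exact replace_go_single a r l.length l [] le_rfl

theorem splitOne_ne_nil (a : Char) (l : List Char) : splitOne a l ≠ [] := by
  cases l with
  | nil => simp [splitOne]
  | cons c t =>
    simp only [splitOne]
    by_cases hc : c = a
    · simp [hc]
    · have := splitOne_ne_nil a t
      simp [hc]
      intro h
      cases hst : splitOne a t with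
      | nil => exact this hst
      | cons x xs => rw [hst] at h; simp at h

theorem splitOn_go_single (a : Char) :
    ∀ (fuel : Nat) (l cur : List Char) (acc : List (List Char)), l.length < fuel →
      PySem.Chars.splitOn.go [a] fuel l cur acc =
        acc.reverse ++ (splitOne a l).modifyHead (cur.reverse ++ ·) := by
  intro fuel
  induction fuel with
  | zero => intro l cur acc h; omega
  | succ n ih =>
    intro l cur acc h
    cases l with
    | nil => simp [PySem.Chars.splitOn.go, splitOne, List.modifyHead]
    | cons c t =>
      have ht : t.length < n := by simpa using h
      simp only [PySem.Chars.splitOn.go, List.isPrefixOf, Bool.and_true]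
      by_cases hac : a = c
      · subst hac
        simp only [beq_self_eq_true, if_true, List.length_cons, List.length_nil,
          Nat.zero_add, List.drop_succ_cons, List.drop_zero]
        rw [ih t [] _ ht]
        simp only [splitOne, beq_self_eq_true, if_true, List.reverse_nil, List.nil_append,
          List.reverse_cons, List.append_assoc, List.singleton_append, List.modifyHead]
        cases hst : splitOne a t with
        | nil => exact absurd hst (splitOne_ne_nil a t)
        | cons x xs => simp
      · rw [if_neg (by simp [hac])]
        rw [ih t (c :: cur) acc ht]
        simp only [splitOne, beq_iff_eq, if_neg (Ne.symm hac)]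
        cases hst : splitOne a t with
        | nil => exact absurd hst (splitOne_ne_nil a t)
        | cons x xs => simp

theorem splitOn_single (a : Char) (l : List Char) :
    PySem.Chars.splitOn l [a] = splitOne a l := by
  rw [PySem.Chars.splitOn, splitOn_go_single a (l.length + 1) l [] [] (by omega)]
  cases hst : splitOne a l with
  | nil => exact absurd hst (splitOne_ne_nil a l)
  | cons x xs => simp

theorem join_append_head (sep x p : List Char) (rest : List (List Char)) :
    PySem.Chars.join sep ((x ++ p) :: rest) = x ++ PySem.Chars.join sep (p :: rest) := by
  cases rest with
  | nil => simp [PySem.Chars.join_singleton]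
  | cons q qs => simp [PySem.Chars.join_cons_cons, List.append_assoc]

-- stripParens cs = cs with '(' and ')' removed
def stripParens (cs : List Char) : List Char := replOne ')' [] (replOne '(' [] cs)

theorem stripParens_cons (c : Char) (t : List Char) :
    stripParens (c :: t) =
      (if c = '(' ∨ c = ')' then [] else [c]) ++ stripParens t := by
  simp only [stripParens, replOne_cons]
  by_cases h1 : c = '('
  · simp [h1]
  · by_cases h2 : c = ')'
    · simp [h2, replOne_cons]
    · simp [h1, h2, replOne_cons]

theorem main_chars (rep : List Char) (cs : List Char) :
    PySem.Chars.join rep ((splitOne ',' cs).map stripParens) =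
      replOne ',' rep (stripParens cs) := by
  induction cs with
  | nil => simp [splitOne, stripParens, replOne, PySem.Chars.join_singleton]
  | cons c t ih =>
    by_cases hc : c = ','
    · subst hc
      simp only [splitOne, beq_self_eq_true, if_true, List.map_cons]
      cases hst : (splitOne ',' t).map stripParens with
      | nil =>
        exact absurd (List.map_eq_nil_iff.mp hst) (splitOne_ne_nil ',' t)
      | cons x xs =>
        rw [PySem.Chars.join_cons_cons]
        rw [← hst, ih]
        rw [stripParens_cons, if_neg (by decide)]
        simp [stripParens, replOne]
    · simp only [splitOne, beq_iff_eq, if_neg hc]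
      cases hst : splitOne ',' t with
      | nil => exact absurd hst (splitOne_ne_nil ',' t)
      | cons x xs =>
        simp only [List.modifyHead, List.map_cons]
        have hx : stripParens (c :: x) =
            (if c = '(' ∨ c = ')' then [] else [c]) ++ stripParens x := stripParens_cons c x
        rw [hx, join_append_head]
        have : PySem.Chars.join rep (stripParens x :: xs.map stripParens)
            = replOne ',' rep (stripParens t) := by
          have := ih
          rw [hst] at this
          simpa using this
        rw [this, stripParens_cons c t]
        rw [replOne_append]
        congr 1
        by_cases h1 : c = '(' ∨ c = ')'
        · simp [h1, replOne]
        · simp [h1, hc, replOne]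

-- split? with the literal separator "," is always `some`
theorem split_comma (s : String) :
    PySem.Str.split? s "," = some ((PySem.Chars.splitOn s.toList [',']).map String.ofList) := by
  have h1 : (",".toList : List Char) = [','] := by decide
  rw [PySem.Str.split?, PySem.Chars.split?, if_neg (by decide), h1]
  rfl

-- the per-string value of A, at the char level: piece s = s with parens dropped, ',' -> ' & '
def piece (cs : List Char) : List Char := replOne ',' (" & ".toList) (stripParens cs)

theorem per_string_chars (s : String) :
    (PySem.Str.join " & "
        ((((PySem.Str.split? s ",").getD []).map (fun e => PySem.Str.replace e "(" "")).map
          (fun e => PySem.Str.replace e ")" ""))).toList = piece s.toList := by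
  rw [PySem.Str.toList_join, split_comma]
  simp only [Option.getD_some, List.map_map, Function.comp_def, PySem.Str.toList_replace,
    String.toList_ofList]
  have h1 : (",".toList : List Char) = [','] := by decide
  have h2 : ("(".toList : List Char) = ['('] := by decide
  have h3 : (")".toList : List Char) = [')'] := by decide
  have h4 : ("".toList : List Char) = [] := by decide
  simp only [h2, h3, h4, splitOn_single, replace_single]
  exact main_chars (" & ".toList) s.toList

-- the guard in A is always true: split(',') never returns the empty list
theorem pvGuard_true (t : List String) (h : t ≠ []) :
    PySem.Set.len (PySem.Set.ofList t) ≥ 1 := by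
  obtain ⟨x, xs, rfl⟩ := List.exists_cons_of_ne_nil h
  have hx : x ∈ PySem.Set.ofList (x :: xs) := (PySem.Set.mem_ofList _ _).mpr (by simp)
  have : PySem.Set.ofList (x :: xs) ≠ [] := List.ne_nil_of_mem hx
  have hlen : 0 < (PySem.Set.ofList (x :: xs)).length := List.length_pos_iff.mpr this
  unfold PySem.Set.len
  exact_mod_cast hlen

theorem split_ne_nil (s : String) : ((PySem.Str.split? s ",").getD []) ≠ [] := by
  rw [split_comma]
  simp only [Option.getD_some, ne_eq, List.map_eq_nil_iff]
  rw [splitOn_single]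
  exact splitOne_ne_nil ',' s.toList

-- the accumulator loop of A is a map (its guard always fires)
theorem foldl_eq_map (xs : List String) :
    ∀ acc : List String,
      xs.foldl (fun expressions tuples_list =>
        let t := (PySem.Str.split? tuples_list ",").getD []
        let t := t.map (fun e => PySem.Str.replace e "(" "")
        let t := t.map (fun e => PySem.Str.replace e ")" "")
        if PySem.Set.len (PySem.Set.ofList t) ≥ 1 then
          expressions ++ [PySem.Str.join " & " t]
        else
          expressions) acc
      = acc ++ xs.map (fun s =>
          PySem.Str.join " & "
            ((((PySem.Str.split? s ",").getD []).map (fun e => PySem.Str.replace e "(" "")).map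
              (fun e => PySem.Str.replace e ")" ""))) := by
  induction xs with
  | nil => intro acc; simp
  | cons x xs ih =>
    intro acc
    simp only [List.foldl_cons, List.map_cons]
    have hne : (((PySem.Str.split? x ",").getD []).map (fun e => PySem.Str.replace e "(" "")).map
        (fun e => PySem.Str.replace e ")" "") ≠ [] := by
      simp only [ne_eq, List.map_eq_nil_iff]
      exact split_ne_nil x
    rw [if_pos (pvGuard_true _ hne)]
    rw [ih]
    simp

-- B's inner character loop computes piece, appended to the accumulator
theorem inner_fold (cs : List Char) :
    ∀ out : List Char,
      cs.foldl (fun out ch =>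
        if ch = '(' ∨ ch = ')' then out
        else if ch = ',' then out ++ " & ".toList
        else out ++ [ch]) out = out ++ piece cs := by
  induction cs with
  | nil => intro out; simp [piece, stripParens, replOne]
  | cons c t ih =>
    intro out
    simp only [List.foldl_cons]
    have hp : piece (c :: t) =
        (if c = '(' ∨ c = ')' then []
         else if c = ',' then " & ".toList else [c]) ++ piece t := by
      unfold piece
      rw [stripParens_cons]
      by_cases h1 : c = '(' ∨ c = ')'
      · simp [h1]
      · rw [if_neg h1]
        simp only [List.singleton_append]
        rw [replOne_cons]
        by_cases h2 : c = ','
        · simp [h2]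
        · simp [h1, h2]
    by_cases h1 : c = '(' ∨ c = ')'
    · rw [if_pos h1, ih, hp, if_pos h1]; simp
    · rw [if_neg h1, hp, if_neg h1]
      by_cases h2 : c = ','
      · rw [if_pos h2, ih, if_pos h2]; simp
      · rw [if_neg h2, ih, if_neg h2]; simp

-- Chars.join with a separator, unrolled to a flatMap over the tail
theorem join_eq_flatMap (sep : List Char) (p : List Char) (ps : List (List Char)) :
    PySem.Chars.join sep (p :: ps) = p ++ ps.flatMap (fun q => sep ++ q) := by
  induction ps generalizing p with
  | nil => simp [PySem.Chars.join_singleton]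
  | cons q qs ih =>
    rw [PySem.Chars.join_cons_cons, ih q]
    simp [List.append_assoc]

-- B's outer loop, once past the first string, concatenates ' | ' ++ piece for each string
theorem outer_fold (xs : List String) :
    ∀ acc : List Char,
      xs.foldl (fun (st : List Char × Bool) s =>
        let out := if st.2 = false then st.1 ++ " | ".toList else st.1
        let out := s.toList.foldl (fun out ch =>
          if ch = '(' ∨ ch = ')' then out
          else if ch = ',' then out ++ " & ".toList
          else out ++ [ch]) out
        (out, false)) (acc, false)
      = (acc ++ xs.flatMap (fun s => " | ".toList ++ piece s.toList), false) := by
  induction xs with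
  | nil => intro acc; simp
  | cons x xs ih =>
    intro acc
    simp only [List.foldl_cons, List.flatMap_cons]
    rw [inner_fold x.toList]
    rw [ih]
    simp [List.append_assoc]

-- ===== VERDICT (by name: the statement is the Claim_ definition above) =====
theorem create_head_expression_spec : Claim_equal_create_head_expression := by
  intro xs _
  unfold Spec_create_head_expression create_head_expression create_head_expression_alt
  apply String.toList_injective
  rw [foldl_eq_map xs []]
  simp only [List.nil_append]
  rw [PySem.Str.toList_join]
  cases xs with
  | nil => simp
  | cons x t =>
    have hmap : ((x :: t).map (fun s =>
          PySem.Str.join " & "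
            ((((PySem.Str.split? s ",").getD []).map (fun e => PySem.Str.replace e "(" "")).map
              (fun e => PySem.Str.replace e ")" "")))).map String.toList
        = (x :: t).map (fun s => piece s.toList) := by
      rw [List.map_map]
      exact List.map_congr_left fun s _ => per_string_chars s
    rw [hmap]
    simp only [List.map_cons]
    rw [join_eq_flatMap]
    simp only [List.foldl_cons]
    rw [if_neg (by simp), inner_fold x.toList, List.nil_append, outer_fold t (piece x.toList)]
    simp [List.flatMap_map]
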